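-- pv_equiv track=rewrite | github.com/2Hyeok/Python | py6.py | strcmp2
-- ===== SOURCE A (Python) =====
-- def strcmp2(s, t):
--     for i in range(min(len(s),len(t))):
--         if(ord(s[i]) < ord(t[i])):
--            return -1
--         elif(ord(s[i]) > ord(t[i])):
--              return 1
--     if len(s) > len(t):
--         return 1
--     elif len(s) < len(t):
--         return -1
--     else:
--         return 0
-- ===== SOURCE B (Python) =====
-- def strcmp2(s, t):
--     return (s > t) - (s < t)
-- ===== Notes on version B (the rewrite author's own statement) =====
-- stated objective: idiomatic
-- what changed: Replaces the explicit ord()-by-ord() index loop and length tie-break with Python's built-in lexicographic string comparison via the sign idiom (s > t) - (s < t).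
import Mathlib
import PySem

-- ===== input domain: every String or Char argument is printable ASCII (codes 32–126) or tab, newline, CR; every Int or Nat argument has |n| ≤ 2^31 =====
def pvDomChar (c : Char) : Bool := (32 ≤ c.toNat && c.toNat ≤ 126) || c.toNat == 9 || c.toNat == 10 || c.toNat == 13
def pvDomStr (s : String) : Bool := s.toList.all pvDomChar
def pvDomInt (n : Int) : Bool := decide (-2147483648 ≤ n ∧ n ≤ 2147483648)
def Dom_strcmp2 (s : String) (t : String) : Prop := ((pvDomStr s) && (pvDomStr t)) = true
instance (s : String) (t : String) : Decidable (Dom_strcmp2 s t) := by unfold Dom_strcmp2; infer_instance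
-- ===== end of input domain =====

-- B replaces A's explicit ord()-by-ord() index loop and length tie-break with the
-- sign-of-comparison idiom (s > t) - (s < t) over built-in lexicographic string order.

-- ===== PORT A =====
-- the index loop over range(min(len s, len t)) as structural recursion on the two
-- character lists; the fall-through length comparison is the second match arm
def strcmp2Go : List Char → List Char → Int
  | a :: as, b :: bs =>
      if a.toNat < b.toNat then -1
      else if a.toNat > b.toNat then 1
      else strcmp2Go as bs
  | as, bs =>
      if as.length > bs.length then 1
      else if as.length < bs.length then -1
      else 0

def strcmp2 (s : String) (t : String) : Int := strcmp2Go s.toList t.toList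

-- ===== PORT B =====
-- (s > t) - (s < t): Python's string < is lexicographic by code point, which is
-- exactly List.lt (List.Lex (· < ·)) on the character lists
def strcmp2_alt (s : String) (t : String) : Int :=
  (if t.toList < s.toList then (1 : Int) else 0) -
  (if s.toList < t.toList then (1 : Int) else 0)

-- ===== PRECONDITION & SPEC =====
def Spec_strcmp2 (s : String) (t : String) (out : Int) : Prop := out = strcmp2_alt s t
instance (s : String) (t : String) (out : Int) : Decidable (Spec_strcmp2 s t out) := by unfold Spec_strcmp2; infer_instance

-- ===== CLAIM (what is proved, stated in full; the proofs are below) =====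
def Claim_equal_strcmp2 : Prop := ∀ (s : String) (t : String), Dom_strcmp2 s t → Spec_strcmp2 s t (strcmp2 s t)

-- ===== LEMMAS AND PROOFS =====
lemma char_lt_iff (a b : Char) : a < b ↔ a.toNat < b.toNat := by
  simp [Char.lt_def, UInt32.lt_iff_toNat_lt]

lemma go_eq (as bs : List Char) :
    strcmp2Go as bs =
      (if bs < as then (1 : Int) else 0) - (if as < bs then (1 : Int) else 0) := by
  induction as generalizing bs with
  | nil =>
    cases bs with
    | nil => simp [strcmp2Go]
    | cons b bs => simp [strcmp2Go, List.nil_lt_cons, List.not_lt_nil]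
  | cons a as ih =>
    cases bs with
    | nil => simp [strcmp2Go, List.nil_lt_cons, List.not_lt_nil]
    | cons b bs =>
      simp only [strcmp2Go, List.cons_lt_cons_iff, ih]
      rcases Nat.lt_trichotomy a.toNat b.toNat with h | h | h
      · have hne : b ≠ a := by intro e; subst e; omega
        have h2 : ¬ b < a := by simp [char_lt_iff]; omega
        simp [h, (char_lt_iff a b).2 h, h2, hne]
      · have he : a = b := Char.ext (UInt32.toNat_inj.mp h)
        simp [he]
      · have hne : a ≠ b := by intro e; subst e; omega
        have h2 : ¬ a < b := by simp [char_lt_iff]; omega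
        simp [Nat.lt_asymm h, h, (char_lt_iff b a).2 h, h2, hne]

-- ===== VERDICT (by name: the statement is the Claim_ definition above) =====
theorem strcmp2_spec : Claim_equal_strcmp2 := by
  intro s t _
  unfold Spec_strcmp2 strcmp2 strcmp2_alt
  exact go_eq s.toList t.toList
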